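-- pv_equiv track=rewrite | github.com/Ruiqi-Chen-0216/CapNav | scripts/score.py | exists_traversable_path
-- ===== SOURCE A (Python) =====
-- from collections import defaultdict, deque
-- from typing import Dict, List, Optional, Tuple
--
-- def agent_key(traverse: Dict, agent: str) -> Optional[str]:
--     a = (agent or "").upper()
--     if a in traverse:
--         return a
--     if a == "HUMANOID" and "ROBOT" in traverse:
--         return "ROBOT"
--     return None
--
-- def edge_traversable(traverse: Dict, agent: str, u: str, v: str) -> bool:
--     k = agent_key(traverse, agent)
--     if not k:
--         return False
--     ad = traverse[k]
--     return bool(ad.get(f"{u}|{v}", ad.get(f"{v}|{u}", {})).get("traversable", False))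
--
-- def exists_traversable_path(adj: Dict[str, List[str]], traverse: Dict, agent: str, src: str, tgt: str) -> bool:
--     if src == tgt:
--         return True
--     dq = deque([src])
--     seen = {src}
--     while dq:
--         u = dq.popleft()
--         for v in adj.get(u, []):
--             if v in seen:
--                 continue
--             if not edge_traversable(traverse, agent, u, v):
--                 continue
--             if v == tgt:
--                 return True
--             seen.add(v)
--             dq.append(v)
--     return False
-- ===== SOURCE B (Python) =====
-- from typing import Dict, List, Optional
--
-- def agent_key(traverse: Dict, agent: str) -> Optional[str]:
--     a = (agent or "").upper()
--     if a in traverse: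
--         return a
--     if a == "HUMANOID" and "ROBOT" in traverse:
--         return "ROBOT"
--     return None
--
-- def edge_traversable(traverse: Dict, agent: str, u: str, v: str) -> bool:
--     k = agent_key(traverse, agent)
--     if not k:
--         return False
--     ad = traverse[k]
--     return bool(ad.get(f"{u}|{v}", ad.get(f"{v}|{u}", {})).get("traversable", False))
--
-- def exists_traversable_path(adj: Dict[str, List[str]], traverse: Dict, agent: str, src: str, tgt: str) -> bool:
--     # Level-by-level saturation: grow the reachable set to a fixpoint, then test membership.
--     reach = {src}
--     while True:
--         new = {v for u in reach for v in adj.get(u, [])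
--                if v not in reach and edge_traversable(traverse, agent, u, v)}
--         if not new:
--             break
--         reach |= new
--     return tgt in reach
-- ===== Notes on version B (the rewrite author's own statement) =====
-- stated objective: alternative
-- what changed: Replaces the FIFO-queue BFS (per-node dequeue, seen-set, early return on hitting the target) with a whole-level fixpoint saturation: repeatedly add all not-yet-reached traversable successors of the current reach set until nothing new appears, then test target membership.
import Mathlib
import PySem

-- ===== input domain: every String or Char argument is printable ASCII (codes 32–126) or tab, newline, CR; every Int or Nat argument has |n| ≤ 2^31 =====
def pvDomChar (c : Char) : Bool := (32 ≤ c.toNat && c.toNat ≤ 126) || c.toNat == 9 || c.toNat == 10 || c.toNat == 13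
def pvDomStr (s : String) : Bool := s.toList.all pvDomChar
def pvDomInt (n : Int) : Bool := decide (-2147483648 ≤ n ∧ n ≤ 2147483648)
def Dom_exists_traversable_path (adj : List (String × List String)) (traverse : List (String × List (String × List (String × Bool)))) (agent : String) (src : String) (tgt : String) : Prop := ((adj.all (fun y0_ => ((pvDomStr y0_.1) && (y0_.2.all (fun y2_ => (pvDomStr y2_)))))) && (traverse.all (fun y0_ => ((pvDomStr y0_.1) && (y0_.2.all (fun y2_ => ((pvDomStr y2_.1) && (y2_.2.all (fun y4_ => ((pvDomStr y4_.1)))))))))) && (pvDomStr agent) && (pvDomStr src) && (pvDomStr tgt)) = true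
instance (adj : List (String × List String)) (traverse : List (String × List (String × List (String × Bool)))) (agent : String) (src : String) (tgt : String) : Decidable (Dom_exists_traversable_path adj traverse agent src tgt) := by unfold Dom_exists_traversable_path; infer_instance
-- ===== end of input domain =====

-- B replaces A's FIFO-queue BFS with a level-set saturation to a fixpoint (no queue, no
-- early target return, order-independent); objective: alternative, no speed claim.

-- ===== PORT A =====
-- shared module helpers of Source A (agent_key / edge_traversable), used verbatim by both programs

-- agent_key: a = (agent or "").upper() — '(agent or "")' equals agent itself under upper (upper "" = "")
def agentKey (traverse : List (String × List (String × List (String × Bool)))) (agent : String) : Option String :=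
  let a := PySem.Str.upper agent
  if (PySem.Dict.mk traverse).contains a then some a
  else if a == "HUMANOID" && (PySem.Dict.mk traverse).contains "ROBOT" then some "ROBOT"
  else none

-- edge_traversable; 'if not k' is falsy on both None and "" (k = "" can occur when "" is a key)
def edgeTrav (traverse : List (String × List (String × List (String × Bool)))) (agent : String) (u v : String) : Bool :=
  match agentKey traverse agent with
  | none => false
  | some k =>
    if k == "" then false
    else
      -- traverse[k]: k is guaranteed to be a key here, so getD never sees its default
      let ad := (PySem.Dict.mk traverse).getD k []
      let inner := (PySem.Dict.mk ad).getD (u ++ "|" ++ v) ((PySem.Dict.mk ad).getD (v ++ "|" ++ u) [])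
      (PySem.Dict.mk inner).getD "traversable" false

-- adj.get(u, [])
def pvAdj (adj : List (String × List String)) (u : String) : List String :=
  (PySem.Dict.mk adj).getD u []

-- all values of adj (a universe containing every node either program can ever add to `seen`/`reach`)
def pvUniv (adj : List (String × List String)) : List String := adj.flatMap (fun p => p.2)

-- termination measure: how many entries of the universe a seen-set does not yet contain
def pvUnseen (adj : List (String × List String)) (seen : List String) : Nat :=
  ((pvUniv adj).filter (fun x => !PySem.Set.contains seen x)).length

lemma pvAdj_subset_univ (adj : List (String × List String)) (u : String) :
    ∀ v ∈ pvAdj adj u, v ∈ pvUniv adj := by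
  intro v hv
  unfold pvAdj at hv
  rcases h : (PySem.Dict.mk adj).get? u with _ | l
  · rw [PySem.Dict.getD_of_get?_eq_none _ _ h] at hv; simp at hv
  · rw [PySem.Dict.getD_of_get?_eq_some _ _ h] at hv
    have hm := PySem.Dict.mem_items_of_get?_eq_some _ h
    exact List.mem_flatMap.mpr ⟨(u, l), hm, hv⟩

lemma pvFilterMono {α : Type} (U : List α) (p q : α → Bool) (himp : ∀ x, q x = true → p x = true) :
    (U.filter q).length ≤ (U.filter p).length := by
  rw [← List.countP_eq_length_filter, ← List.countP_eq_length_filter]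
  exact List.countP_mono_left (fun x _ h => himp x h)

lemma pvFilterStrict {α : Type} (U : List α) (p q : α → Bool)
    (himp : ∀ x, q x = true → p x = true) (v : α) (hv : v ∈ U) (hp : p v = true)
    (hq : q v = false) : (U.filter q).length < (U.filter p).length := by
  induction U with
  | nil => cases hv
  | cons a t ih =>
    rcases List.mem_cons.mp hv with rfl | ht
    · have := pvFilterMono t p q himp
      simp only [List.filter_cons, hp, hq, if_true, Bool.false_eq_true, if_false,
        List.length_cons]
      omega
    · have hlt := ih ht
      by_cases hqa : q a = true
      · have hpa := himp a hqa
        simp only [List.filter_cons, hqa, hpa, if_pos, List.length_cons]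
        omega
      · by_cases hpa : p a = true <;>
          simp only [List.filter_cons, hqa, hpa, if_pos, if_neg, Bool.false_eq_true,
            not_false_iff, List.length_cons] <;> omega

lemma pvContains_eq_decide (s : List String) (x : String) :
    PySem.Set.contains s x = decide (x ∈ s) := by
  rcases hc : PySem.Set.contains s x with _ | _
  · symm
    simp only [decide_eq_false_iff_not]
    intro hm
    rw [(PySem.Set.contains_iff s x).mpr hm] at hc
    cases hc
  · symm
    simp [(PySem.Set.contains_iff s x).mp hc]

lemma pvUnseen_strict (adj : List (String × List String)) (s s' : List String) (v : String)
    (hvU : v ∈ pvUniv adj) (hvs : v ∉ s) (hvs' : v ∈ s')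
    (h : ∀ x, x ∈ s → x ∈ s') : pvUnseen adj s' < pvUnseen adj s := by
  refine pvFilterStrict (pvUniv adj) _ _ ?_ v hvU ?_ ?_
  · intro x hx
    simp only [pvContains_eq_decide, Bool.not_eq_true', decide_eq_false_iff_not] at hx ⊢
    exact fun hm => hx (h x hm)
  · simp [pvContains_eq_decide, hvs]
  · simp [pvContains_eq_decide, hvs']

-- the inner for-loop of A's while body, scanning adj.get(u, []): `none` = the Python `return True`
def bfsScan (traverse : List (String × List (String × List (String × Bool)))) (agent tgt u : String)
    (vs seen dq : List String) : Option (List String × List String) :=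
  match vs with
  | [] => some (seen, dq)
  | v :: rest =>
    if PySem.Set.contains seen v then bfsScan traverse agent tgt u rest seen dq
    else if !(edgeTrav traverse agent u v) then bfsScan traverse agent tgt u rest seen dq
    else if v == tgt then none
    else bfsScan traverse agent tgt u rest (PySem.Set.add seen v) (dq ++ [v])

-- structure of a completed scan: seen and the queue both grow by the same fresh non-target nodes
lemma bfsScan_some (traverse : List (String × List (String × List (String × Bool))))
    (agent tgt u : String) :
    ∀ vs seen dq seen' dq', bfsScan traverse agent tgt u vs seen dq = some (seen', dq') →
    ∃ news, dq' = dq ++ news ∧ seen' = seen ++ news ∧ news.Nodup ∧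
      ∀ x ∈ news, x ∈ vs ∧ edgeTrav traverse agent u x = true ∧ x ∉ seen ∧ x ≠ tgt := by
  intro vs
  induction vs with
  | nil =>
    intro seen dq seen' dq' h
    simp only [bfsScan, Option.some.injEq, Prod.mk.injEq] at h
    exact ⟨[], by simp [h.2.symm], by simp [h.1.symm], List.nodup_nil, by simp⟩
  | cons v rest ih =>
    intro seen dq seen' dq' h
    rw [bfsScan] at h
    by_cases h1 : PySem.Set.contains seen v = true
    · rw [if_pos h1] at h
      obtain ⟨news, hd, hs, hnd, hall⟩ := ih _ _ _ _ h
      exact ⟨news, hd, hs, hnd, fun x hx =>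
        ⟨List.mem_cons_of_mem _ (hall x hx).1, (hall x hx).2.1, (hall x hx).2.2.1, (hall x hx).2.2.2⟩⟩
    · rw [if_neg h1] at h
      by_cases h2 : edgeTrav traverse agent u v = true
      · rw [if_neg (by simp [h2])] at h
        by_cases h3 : v = tgt
        · rw [if_pos (by simpa using h3)] at h; cases h
        · rw [if_neg (by simpa using h3)] at h
          have hvseen : v ∉ seen := by
            intro hm; exact h1 ((PySem.Set.contains_iff seen v).mpr hm)
          rw [PySem.Set.add_of_not_mem hvseen] at h
          obtain ⟨news, hd, hs, hnd, hall⟩ := ih _ _ _ _ h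
          refine ⟨v :: news, by simpa using hd, by simpa using hs, ?_, ?_⟩
          · refine List.nodup_cons.mpr ⟨fun hvn => ?_, hnd⟩
            exact (hall v hvn).2.2.1 (by simp)
          · intro x hx
            rcases List.mem_cons.mp hx with rfl | hxn
            · exact ⟨List.mem_cons_self .., h2, hvseen, h3⟩
            · refine ⟨List.mem_cons_of_mem _ (hall x hxn).1, (hall x hxn).2.1, ?_,
                (hall x hxn).2.2.2⟩
              intro hm; exact (hall x hxn).2.2.1 (by simp [hm])
      · have h2' : edgeTrav traverse agent u v = false := by
          rcases hh : edgeTrav traverse agent u v with _ | _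
          · rfl
          · exact absurd hh h2
        rw [if_pos (by simp [h2'])] at h
        obtain ⟨news, hd, hs, hnd, hall⟩ := ih _ _ _ _ h
        exact ⟨news, hd, hs, hnd, fun x hx =>
          ⟨List.mem_cons_of_mem _ (hall x hx).1, (hall x hx).2.1, (hall x hx).2.2.1, (hall x hx).2.2.2⟩⟩

lemma pvUnseen_append (adj : List (String × List String)) :
    ∀ (news seen : List String), news.Nodup → (∀ x ∈ news, x ∈ pvUniv adj ∧ x ∉ seen) →
    pvUnseen adj (seen ++ news) + news.length ≤ pvUnseen adj seen := by
  intro news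
  induction news with
  | nil => intro seen _ _; simp
  | cons n ns ih =>
    intro seen hnd hU
    have hn := hU n (by simp)
    have hstep : pvUnseen adj (seen ++ [n]) < pvUnseen adj seen :=
      pvUnseen_strict adj seen (seen ++ [n]) n hn.1 hn.2 (by simp)
        (fun x hx => by simp [hx])
    have hrec := ih (seen ++ [n]) (List.nodup_cons.mp hnd).2 (fun x hx => by
      refine ⟨(hU x (by simp [hx])).1, ?_⟩
      intro hm
      rcases List.mem_append.mp hm with hm1 | hm2
      · exact (hU x (by simp [hx])).2 hm1
      · exact (List.nodup_cons.mp hnd).1 (by simpa using (List.mem_singleton.mp hm2) ▸ hx))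
    have heq : seen ++ n :: ns = (seen ++ [n]) ++ ns := by simp
    rw [heq]
    simp only [List.length_cons]
    omega

-- each fresh node drops the unseen count, so a completed scan decreases 2·unseen + |queue|
lemma bfsScan_measure (adj : List (String × List String))
    (traverse : List (String × List (String × List (String × Bool)))) (agent tgt u : String)
    (vs seen dq seen' dq' : List String) (hvs : ∀ v ∈ vs, v ∈ pvUniv adj)
    (h : bfsScan traverse agent tgt u vs seen dq = some (seen', dq')) :
    2 * pvUnseen adj seen' + dq'.length ≤ 2 * pvUnseen adj seen + dq.length := by
  obtain ⟨news, hd, hs, hnd, hall⟩ := bfsScan_some traverse agent tgt u vs seen dq seen' dq' h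
  have := pvUnseen_append adj news seen hnd
    (fun x hx => ⟨hvs x (hall x hx).1, (hall x hx).2.2.1⟩)
  subst hd hs
  simp only [List.length_append]
  omega

-- A's while-dq loop
def bfsLoop (adj : List (String × List String))
    (traverse : List (String × List (String × List (String × Bool)))) (agent tgt : String)
    (dq seen : List String) : Bool :=
  match dq with
  | [] => false
  | u :: rest =>
    match h : bfsScan traverse agent tgt u (pvAdj adj u) seen rest with
    | none => true
    | some (seen', dq') => bfsLoop adj traverse agent tgt dq' seen'
termination_by 2 * pvUnseen adj seen + dq.length
decreasing_by
  have := bfsScan_measure adj traverse agent tgt u (pvAdj adj u) seen rest seen' dq'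
    (pvAdj_subset_univ adj u) h
  simp only [List.length_cons]
  omega

def exists_traversable_path (adj : List (String × List String)) (traverse : List (String × List (String × List (String × Bool)))) (agent : String) (src : String) (tgt : String) : Bool :=
  if src == tgt then true
  else bfsLoop adj traverse agent tgt [src] (PySem.Set.ofList [src])

-- ===== PORT B =====
-- the set comprehension: all not-yet-reached traversable successors of the current reach set
def satFrontier (adj : List (String × List String))
    (traverse : List (String × List (String × List (String × Bool)))) (agent : String)
    (reach : List String) : List String :=
  PySem.Set.ofList (reach.flatMap (fun u =>
    (pvAdj adj u).filter (fun v => !PySem.Set.contains reach v && edgeTrav traverse agent u v)))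

lemma mem_satFrontier (adj : List (String × List String))
    (traverse : List (String × List (String × List (String × Bool)))) (agent : String)
    (reach : List String) (v : String) :
    v ∈ satFrontier adj traverse agent reach ↔
      ∃ u ∈ reach, v ∈ pvAdj adj u ∧ v ∉ reach ∧ edgeTrav traverse agent u v = true := by
  unfold satFrontier
  rw [PySem.Set.mem_ofList]
  simp only [List.mem_flatMap, List.mem_filter, Bool.and_eq_true, Bool.not_eq_true',
    PySem.Set.contains_iff]
  constructor
  · rintro ⟨u, hu, hv, hnv, he⟩
    exact ⟨u, hu, hv, by simpa using hnv, he⟩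
  · rintro ⟨u, hu, hv, hnv, he⟩
    refine ⟨u, hu, hv, ?_, he⟩
    rcases hc : PySem.Set.contains reach v with _ | _
    · rfl
    · exact absurd ((PySem.Set.contains_iff reach v).mp hc) hnv

lemma satFrontier_grow (adj : List (String × List String))
    (traverse : List (String × List (String × List (String × Bool)))) (agent : String)
    (reach : List String) (h : satFrontier adj traverse agent reach ≠ []) :
    pvUnseen adj (PySem.Set.update reach (satFrontier adj traverse agent reach)) <
      pvUnseen adj reach := by
  obtain ⟨v, hv⟩ := List.exists_mem_of_ne_nil _ h
  obtain ⟨u, _, hvu, hvr, _⟩ := (mem_satFrontier adj traverse agent reach v).mp hv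
  exact pvUnseen_strict adj reach _ v (pvAdj_subset_univ adj u v hvu) hvr
    ((PySem.Set.mem_update reach _ v).mpr (Or.inr hv))
    (fun x hx => (PySem.Set.mem_update reach _ x).mpr (Or.inl hx))

-- B's while-True loop: saturate reach until no new node appears
def satLoop (adj : List (String × List String))
    (traverse : List (String × List (String × List (String × Bool)))) (agent : String)
    (reach : List String) : List String :=
  if h : satFrontier adj traverse agent reach = [] then reach
  else satLoop adj traverse agent (PySem.Set.update reach (satFrontier adj traverse agent reach))
termination_by pvUnseen adj reach
decreasing_by exact satFrontier_grow adj traverse agent reach h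

def exists_traversable_path_alt (adj : List (String × List String)) (traverse : List (String × List (String × List (String × Bool)))) (agent : String) (src : String) (tgt : String) : Bool :=
  PySem.Set.contains (satLoop adj traverse agent (PySem.Set.ofList [src])) tgt

-- ===== PRECONDITION & SPEC =====
def Spec_exists_traversable_path (adj : List (String × List String)) (traverse : List (String × List (String × List (String × Bool)))) (agent : String) (src : String) (tgt : String) (out : Bool) : Prop := out = exists_traversable_path_alt adj traverse agent src tgt
instance (adj : List (String × List String)) (traverse : List (String × List (String × List (String × Bool)))) (agent : String) (src : String) (tgt : String) (out : Bool) : Decidable (Spec_exists_traversable_path adj traverse agent src tgt out) := by unfold Spec_exists_traversable_path; infer_instance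

-- ===== CLAIM (what is proved, stated in full; the proofs are below) =====
def Claim_equal_exists_traversable_path : Prop := ∀ (adj : List (String × List String)) (traverse : List (String × List (String × List (String × Bool)))) (agent : String) (src : String) (tgt : String), Dom_exists_traversable_path adj traverse agent src tgt → Spec_exists_traversable_path adj traverse agent src tgt (exists_traversable_path adj traverse agent src tgt)

-- ===== LEMMAS AND PROOFS =====

-- the traversable edge relation both programs explore, and reachability under it
def pvEdge (adj : List (String × List String))
    (traverse : List (String × List (String × List (String × Bool)))) (agent : String)
    (u v : String) : Prop :=
  v ∈ pvAdj adj u ∧ edgeTrav traverse agent u v = true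

lemma pvReach_closed (adj : List (String × List String))
    (traverse : List (String × List (String × List (String × Bool)))) (agent : String)
    (R : List String) (hcl : ∀ u ∈ R, ∀ v, pvEdge adj traverse agent u v → v ∈ R)
    {s t : String} (hs : s ∈ R)
    (h : Relation.ReflTransGen (pvEdge adj traverse agent) s t) : t ∈ R := by
  induction h with
  | refl => exact hs
  | tail _ e ih => exact hcl _ ih _ e

-- ---- B-side: the saturated set is exactly the reachable set ----

lemma satLoop_subset (adj : List (String × List String))
    (traverse : List (String × List (String × List (String × Bool)))) (agent : String) :
    ∀ reach, ∀ x ∈ reach, x ∈ satLoop adj traverse agent reach := by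
  intro reach
  induction reach using satLoop.induct adj traverse agent with
  | case1 reach h => rw [satLoop, dif_pos h]; exact fun x hx => hx
  | case2 reach h ih =>
    rw [satLoop, dif_neg h]
    exact fun x hx => ih x ((PySem.Set.mem_update reach _ x).mpr (Or.inl hx))

lemma satLoop_closed (adj : List (String × List String))
    (traverse : List (String × List (String × List (String × Bool)))) (agent : String) :
    ∀ reach, ∀ u ∈ satLoop adj traverse agent reach, ∀ v,
      pvEdge adj traverse agent u v → v ∈ satLoop adj traverse agent reach := by
  intro reach
  induction reach using satLoop.induct adj traverse agent with
  | case1 reach h =>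
    rw [satLoop, dif_pos h]
    intro u hu v hv
    by_cases hvr : v ∈ reach
    · exact hvr
    · exact absurd ((mem_satFrontier adj traverse agent reach v).mpr
        ⟨u, hu, hv.1, hvr, hv.2⟩) (by simp [h])
  | case2 reach h ih => rw [satLoop, dif_neg h]; exact ih

lemma satLoop_sound (adj : List (String × List String))
    (traverse : List (String × List (String × List (String × Bool)))) (agent src : String) :
    ∀ reach, (∀ x ∈ reach, Relation.ReflTransGen (pvEdge adj traverse agent) src x) →
    ∀ x ∈ satLoop adj traverse agent reach,
      Relation.ReflTransGen (pvEdge adj traverse agent) src x := by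
  intro reach
  induction reach using satLoop.induct adj traverse agent with
  | case1 reach h => rw [satLoop, dif_pos h]; exact fun hr => hr
  | case2 reach h ih =>
    rw [satLoop, dif_neg h]
    intro hr
    apply ih
    intro x hx
    rcases (PySem.Set.mem_update reach _ x).mp hx with hx1 | hx2
    · exact hr x hx1
    · obtain ⟨u, hu, hxu, _, he⟩ := (mem_satFrontier adj traverse agent reach x).mp hx2
      exact Relation.ReflTransGen.tail (hr u hu) ⟨hxu, he⟩

lemma alt_iff (adj : List (String × List String))
    (traverse : List (String × List (String × List (String × Bool)))) (agent src tgt : String) :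
    exists_traversable_path_alt adj traverse agent src tgt = true ↔
      Relation.ReflTransGen (pvEdge adj traverse agent) src tgt := by
  have hof : PySem.Set.ofList [src] = [src] := rfl
  unfold exists_traversable_path_alt
  rw [PySem.Set.contains_iff, hof]
  constructor
  · intro hmem
    exact satLoop_sound adj traverse agent src [src]
      (fun x hx => by rw [List.mem_singleton.mp hx])
      tgt hmem
  · intro hreach
    exact pvReach_closed adj traverse agent _ (satLoop_closed adj traverse agent [src])
      (satLoop_subset adj traverse agent [src] src (by simp)) hreach

-- ---- A-side: the BFS returns true exactly on reachability ----

lemma bfsScan_some_nbr (traverse : List (String × List (String × List (String × Bool))))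
    (agent tgt u : String) :
    ∀ vs seen dq seen' dq', bfsScan traverse agent tgt u vs seen dq = some (seen', dq') →
    ∀ v ∈ vs, edgeTrav traverse agent u v = true → v ∈ seen' := by
  intro vs
  induction vs with
  | nil => intro _ _ _ _ _ v hv; cases hv
  | cons v rest ih =>
    intro seen dq seen' dq' h w hw he
    rw [bfsScan] at h
    by_cases h1 : PySem.Set.contains seen v = true
    · rw [if_pos h1] at h
      rcases List.mem_cons.mp hw with rfl | hwr
      · obtain ⟨news, _, hs, _, _⟩ := bfsScan_some traverse agent tgt u _ _ _ _ _ h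
        rw [hs]
        exact List.mem_append.mpr (Or.inl ((PySem.Set.contains_iff seen w).mp h1))
      · exact ih _ _ _ _ h w hwr he
    · rw [if_neg h1] at h
      by_cases h2 : edgeTrav traverse agent u v = true
      · rw [if_neg (by simp [h2])] at h
        by_cases h3 : v = tgt
        · rw [if_pos (by simpa using h3)] at h; cases h
        · rw [if_neg (by simpa using h3)] at h
          have hvseen : v ∉ seen := fun hm => h1 ((PySem.Set.contains_iff seen v).mpr hm)
          rw [PySem.Set.add_of_not_mem hvseen] at h
          rcases List.mem_cons.mp hw with rfl | hwr
          · obtain ⟨news, _, hs, _, _⟩ := bfsScan_some traverse agent tgt u _ _ _ _ _ h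
            rw [hs]
            exact List.mem_append.mpr (Or.inl (by simp))
          · exact ih _ _ _ _ h w hwr he
      · rcases List.mem_cons.mp hw with rfl | hwr
        · exact absurd he h2
        · have h2' : edgeTrav traverse agent u v = false := by
            rcases hh : edgeTrav traverse agent u v with _ | _
            · rfl
            · exact absurd hh h2
          rw [if_pos (by simp [h2'])] at h
          exact ih _ _ _ _ h w hwr he

lemma bfsScan_none (traverse : List (String × List (String × List (String × Bool))))
    (agent tgt u : String) :
    ∀ vs seen dq, bfsScan traverse agent tgt u vs seen dq = none →
    ∃ v ∈ vs, edgeTrav traverse agent u v = true ∧ v = tgt := by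
  intro vs
  induction vs with
  | nil => intro _ _ h; simp [bfsScan] at h
  | cons v rest ih =>
    intro seen dq h
    rw [bfsScan] at h
    by_cases h1 : PySem.Set.contains seen v = true
    · rw [if_pos h1] at h
      obtain ⟨w, hw, he, ht⟩ := ih _ _ h
      exact ⟨w, List.mem_cons_of_mem _ hw, he, ht⟩
    · rw [if_neg h1] at h
      by_cases h2 : edgeTrav traverse agent u v = true
      · rw [if_neg (by simp [h2])] at h
        by_cases h3 : v = tgt
        · exact ⟨v, by simp, h2, h3⟩
        · rw [if_neg (by simpa using h3)] at h
          obtain ⟨w, hw, he, ht⟩ := ih _ _ h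
          exact ⟨w, List.mem_cons_of_mem _ hw, he, ht⟩
      · have h2' : edgeTrav traverse agent u v = false := by
          rcases hh : edgeTrav traverse agent u v with _ | _
          · rfl
          · exact absurd hh h2
        rw [if_pos (by simp [h2'])] at h
        obtain ⟨w, hw, he, ht⟩ := ih _ _ h
        exact ⟨w, List.mem_cons_of_mem _ hw, he, ht⟩

lemma bfsLoop_sound (adj : List (String × List String))
    (traverse : List (String × List (String × List (String × Bool)))) (agent tgt src : String) :
    ∀ dq seen, (∀ x ∈ dq, Relation.ReflTransGen (pvEdge adj traverse agent) src x) →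
    bfsLoop adj traverse agent tgt dq seen = true →
    Relation.ReflTransGen (pvEdge adj traverse agent) src tgt := by
  intro dq seen
  induction dq, seen using bfsLoop.induct adj traverse agent tgt with
  | case1 seen => intro _ h; rw [bfsLoop] at h; cases h
  | case2 seen u rest h =>
    intro hdq _
    obtain ⟨v, hv, he, rfl⟩ := bfsScan_none traverse agent tgt u _ _ _ h
    exact Relation.ReflTransGen.tail (hdq u (by simp)) ⟨hv, he⟩
  | case3 seen u rest seen' dq' h ih =>
    intro hdq htrue
    rw [bfsLoop, h] at htrue
    apply ih _ htrue
    obtain ⟨news, hd, _, _, hall⟩ := bfsScan_some traverse agent tgt u _ _ _ _ _ h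
    intro x hx
    rw [hd] at hx
    rcases List.mem_append.mp hx with hx1 | hx2
    · exact hdq x (List.mem_cons_of_mem _ hx1)
    · exact Relation.ReflTransGen.tail (hdq u (by simp)) ⟨(hall x hx2).1, (hall x hx2).2.1⟩

lemma bfsLoop_complete (adj : List (String × List String))
    (traverse : List (String × List (String × List (String × Bool)))) (agent tgt : String) :
    ∀ dq seen, dq.Nodup → (∀ x ∈ dq, x ∈ seen) →
    (∀ s ∈ seen, s ∉ dq → ∀ v, pvEdge adj traverse agent s v → v ∈ seen) →
    tgt ∉ seen → bfsLoop adj traverse agent tgt dq seen = false →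
    ∀ s ∈ seen, ¬ Relation.ReflTransGen (pvEdge adj traverse agent) s tgt := by
  intro dq seen
  induction dq, seen using bfsLoop.induct adj traverse agent tgt with
  | case1 seen =>
    intro _ _ hcl htgt _ s hs hreach
    exact htgt (pvReach_closed adj traverse agent seen
      (fun x hx v hv => hcl x hx (by simp) v hv) hs hreach)
  | case2 seen u rest h =>
    intro _ _ _ _ hfalse
    rw [bfsLoop, h] at hfalse
    cases hfalse
  | case3 seen u rest seen' dq' h ih =>
    intro hnd hsub hcl htgt hfalse s hs hreach
    rw [bfsLoop, h] at hfalse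
    obtain ⟨news, hd, hsn, hndnews, hall⟩ := bfsScan_some traverse agent tgt u _ _ _ _ _ h
    have hseen_sub : ∀ x ∈ seen, x ∈ seen' := fun x hx => by
      rw [hsn]; exact List.mem_append.mpr (Or.inl hx)
    refine ih ?_ ?_ ?_ ?_ hfalse s (hseen_sub s hs) hreach
    · -- dq' = rest ++ news is Nodup
      rw [hd]
      refine List.nodup_append.mpr ⟨(List.nodup_cons.mp hnd).2, hndnews, ?_⟩
      intro a ha b hb
      rintro rfl
      exact (hall a hb).2.2.1 (hsub a (List.mem_cons_of_mem _ ha))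
    · -- dq' ⊆ seen'
      intro x hx
      rw [hd] at hx
      rcases List.mem_append.mp hx with hx1 | hx2
      · exact hseen_sub x (hsub x (List.mem_cons_of_mem _ hx1))
      · rw [hsn]; exact List.mem_append.mpr (Or.inr hx2)
    · -- closure for the new state
      intro s' hs' hsdq' v hv
      rw [hsn] at hs'
      rcases List.mem_append.mp hs' with hs1 | hs2
      · by_cases hsu : s' = u
        · subst hsu
          exact bfsScan_some_nbr traverse agent tgt s' _ _ _ _ _ h v hv.1 hv.2
        · have hsrest : s' ∉ rest := fun hm =>
            hsdq' (by rw [hd]; exact List.mem_append.mpr (Or.inl hm))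
          have : s' ∉ u :: rest := by
            intro hm; rcases List.mem_cons.mp hm with hm1 | hm2
            · exact hsu hm1
            · exact hsrest hm2
          exact hseen_sub v (hcl s' hs1 this v hv)
      · exact absurd (by rw [hd]; exact List.mem_append.mpr (Or.inr hs2)) hsdq'
    · -- tgt ∉ seen'
      intro hm
      rw [hsn] at hm
      rcases List.mem_append.mp hm with hm1 | hm2
      · exact htgt hm1
      · exact (hall tgt hm2).2.2.2 rfl

lemma a_iff (adj : List (String × List String))
    (traverse : List (String × List (String × List (String × Bool)))) (agent src tgt : String) :
    exists_traversable_path adj traverse agent src tgt = true ↔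
      Relation.ReflTransGen (pvEdge adj traverse agent) src tgt := by
  have hof : PySem.Set.ofList [src] = [src] := rfl
  unfold exists_traversable_path
  by_cases hst : src = tgt
  · subst hst
    rw [if_pos (by simp)]
    exact ⟨fun _ => Relation.ReflTransGen.refl, fun _ => rfl⟩
  · rw [if_neg (by simp [hst])]
    constructor
    · intro htrue
      exact bfsLoop_sound adj traverse agent tgt src [src] _
        (fun x hx => by rw [List.mem_singleton.mp hx]) htrue
    · intro hreach
      by_contra hfalse
      rw [Bool.not_eq_true] at hfalse
      rw [hof] at hfalse
      exact bfsLoop_complete adj traverse agent tgt [src] [src]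
        (List.nodup_singleton src) (fun x hx => hx)
        (fun s hs hnd _ _ => absurd hs hnd)
        (fun hm => hst (List.mem_singleton.mp hm).symm)
        hfalse src (by simp) hreach

-- ===== VERDICT (by name: the statement is the Claim_ definition above) =====
theorem exists_traversable_path_spec : Claim_equal_exists_traversable_path := by
  intro adj traverse agent src tgt _
  unfold Spec_exists_traversable_path
  rw [Bool.eq_iff_iff, a_iff, alt_iff]
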